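-- pv_equiv track=rewrite | github.com/Cicerolibardi/mc102 | tarefa11/sugestao.py | identificar_sugestao_pares
-- ===== SOURCE A (Python) =====
-- def identificar_sugestao_pares(lista_tuplas_correspondecia_pares):
--     """Recebe uma lista de lista de tuplas com as possíveis sugestões para os pares da entrada,
--     realiza operações para definir a com maior frequência e menor escala na ordem alfabética e
--     retorna uma lista com as palavras sugeridas para cada par."""
--     lista_palavras_sugestao = []
--     for lista_tupla in lista_tuplas_correspondecia_pares:
--         frequencia_sugestao = 0
--         sugestao = ''
--         for i in range(len(lista_tupla)):
--             if lista_tupla[i][0] >= frequencia_sugestao: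
--                 if (((lista_tupla[i][0] == frequencia_sugestao) and lista_tupla[i][1] < sugestao) or
--                     lista_tupla[i][0] > frequencia_sugestao):
--                     frequencia_sugestao = lista_tupla[i][0]
--                     sugestao = lista_tupla[i][1]
--
--         lista_palavras_sugestao.append(sugestao)
--
--     return lista_palavras_sugestao
-- ===== SOURCE B (Python) =====
-- def identificar_sugestao_pares(lista_tuplas_correspondecia_pares):
--     """Sort-then-pick: order each inner list by (-frequency, word) and take the head;
--     emit its word only when its frequency is positive, else ''."""
--     resultado = []
--     for tuplas in lista_tuplas_correspondecia_pares:
--         ordenadas = sorted(tuplas, key=lambda t: (-t[0], t[1]))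
--         if ordenadas and ordenadas[0][0] > 0:
--             resultado.append(ordenadas[0][1])
--         else:
--             resultado.append('')
--     return resultado
-- ===== Notes on version B (the rewrite author's own statement) =====
-- stated objective: alternative
-- what changed: Replaces the maintained-maximum scan with its sentinel state (0,'') by sorting each inner list by (-frequency, word) and taking the head, emitting '' when the list is empty or its best frequency is not positive.
import Mathlib
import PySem

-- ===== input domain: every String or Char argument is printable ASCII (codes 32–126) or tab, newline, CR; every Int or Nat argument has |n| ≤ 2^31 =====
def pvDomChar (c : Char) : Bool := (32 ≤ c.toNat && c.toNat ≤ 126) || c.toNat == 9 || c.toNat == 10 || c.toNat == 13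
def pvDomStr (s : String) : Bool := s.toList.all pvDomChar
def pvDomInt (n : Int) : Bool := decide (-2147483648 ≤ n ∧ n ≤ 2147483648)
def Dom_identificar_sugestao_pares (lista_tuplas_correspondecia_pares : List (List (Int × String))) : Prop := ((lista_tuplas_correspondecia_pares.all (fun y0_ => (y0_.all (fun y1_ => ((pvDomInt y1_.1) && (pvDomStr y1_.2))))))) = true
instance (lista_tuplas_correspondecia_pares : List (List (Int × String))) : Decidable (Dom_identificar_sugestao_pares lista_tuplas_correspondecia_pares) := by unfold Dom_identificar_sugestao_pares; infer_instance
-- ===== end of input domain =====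

-- B replaces A's maintained-maximum scan (with sentinel state (0,'')) by sorting each
-- inner list by (-frequency, word) and picking the head; alternative decomposition, not faster.

-- ===== PORT A =====
def identificar_sugestao_pares (lista_tuplas_correspondecia_pares : List (List (Int × String))) : List String :=
  lista_tuplas_correspondecia_pares.foldl
    (fun lista_palavras_sugestao lista_tupla =>
      lista_palavras_sugestao ++
        [((PySem.List.pyRange 0 (PySem.List.len lista_tupla)).foldl
            (fun (st : Int × String) i =>
              if (PySem.List.pyGetD lista_tupla i ((0 : Int), "")).1 ≥ st.1 then
                if ((PySem.List.pyGetD lista_tupla i ((0 : Int), "")).1 = st.1 ∧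
                      (PySem.List.pyGetD lista_tupla i ((0 : Int), "")).2 < st.2) ∨
                    (PySem.List.pyGetD lista_tupla i ((0 : Int), "")).1 > st.1 then
                  ((PySem.List.pyGetD lista_tupla i ((0 : Int), "")).1,
                   (PySem.List.pyGetD lista_tupla i ((0 : Int), "")).2)
                else st
              else st)
            ((0 : Int), "")).2])
    []

-- ===== PORT B =====
def identificar_sugestao_pares_alt (lista_tuplas_correspondecia_pares : List (List (Int × String))) : List String :=
  lista_tuplas_correspondecia_pares.map
    (fun tuplas =>
      match PySem.List.sorted tuplas (fun t => toLex (-t.1, t.2)) with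
      | [] => ""
      | (f, w) :: _ => if f > 0 then w else "")

-- ===== PRECONDITION & SPEC =====
def Spec_identificar_sugestao_pares (lista_tuplas_correspondecia_pares : List (List (Int × String))) (out : List String) : Prop := out = identificar_sugestao_pares_alt lista_tuplas_correspondecia_pares
instance (lista_tuplas_correspondecia_pares : List (List (Int × String))) (out : List String) : Decidable (Spec_identificar_sugestao_pares lista_tuplas_correspondecia_pares out) := by unfold Spec_identificar_sugestao_pares; infer_instance

-- ===== CLAIM (what is proved, stated in full; the proofs are below) =====
def Claim_equal_identificar_sugestao_pares : Prop := ∀ (lista_tuplas_correspondecia_pares : List (List (Int × String))), Dom_identificar_sugestao_pares lista_tuplas_correspondecia_pares → Spec_identificar_sugestao_pares lista_tuplas_correspondecia_pares (identificar_sugestao_pares lista_tuplas_correspondecia_pares)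

-- ===== LEMMAS AND PROOFS =====

-- the lexicographic key (-frequency, word), as used by B's sort
def pvKey (t : Int × String) : Lex (Int × String) := toLex (-t.1, t.2)

theorem pvKey_inj {a b : Int × String} (h : pvKey a = pvKey b) : a = b := by
  rcases a with ⟨f, w⟩; rcases b with ⟨g, v⟩
  have := toLex.injective h
  simp only [Prod.mk.injEq, neg_inj] at this
  exact Prod.ext (by omega) this.2

-- A's update condition is exactly "strictly smaller pvKey"
theorem pvStep_eq (st t : Int × String) :
    (if t.1 ≥ st.1 then
       if (t.1 = st.1 ∧ t.2 < st.2) ∨ t.1 > st.1 then (t.1, t.2) else st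
     else st)
    = if pvKey t < pvKey st then t else st := by
  rcases t with ⟨f, w⟩; rcases st with ⟨fr, s⟩
  simp only [pvKey, Prod.Lex.toLex_lt_toLex]
  split_ifs with h1 h2 h3 h3 h3 <;> try rfl
  · exfalso; apply h3
    rcases h2 with ⟨he, hw⟩ | hgt
    · exact Or.inr ⟨by omega, hw⟩
    · exact Or.inl (by omega)
  · exfalso
    rcases h3 with hlt | ⟨he, hw⟩
    · exact h2 (Or.inr (by omega))
    · exact h2 (Or.inl ⟨by omega, hw⟩)
  · exfalso
    rcases h3 with hlt | ⟨he, hw⟩ <;> simp at h1 <;> omega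

-- the running-minimum fold returns a minimal element of init :: l
theorem pvFoldMin (l : List (Int × String)) (init : Int × String) :
    (l.foldl (fun st t => if pvKey t < pvKey st then t else st) init) ∈ init :: l ∧
    ∀ y ∈ init :: l,
      pvKey (l.foldl (fun st t => if pvKey t < pvKey st then t else st) init) ≤ pvKey y := by
  induction l generalizing init with
  | nil => simp
  | cons t tl ih =>
    simp only [List.foldl_cons]
    obtain ⟨hmem, hmin⟩ := ih (if pvKey t < pvKey init then t else init)
    have hle_init : pvKey (if pvKey t < pvKey init then t else init) ≤ pvKey init := by
      split_ifs with h
      · exact le_of_lt h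
      · exact le_refl _
    have hle_t : pvKey (if pvKey t < pvKey init then t else init) ≤ pvKey t := by
      split_ifs with h
      · exact le_refl _
      · exact le_of_not_gt h
    have h0 := hmin _ (List.mem_cons_self ..)
    constructor
    · rcases List.mem_cons.mp hmem with h | h
      · rw [h]; split_ifs with hc
        · exact List.mem_cons_of_mem _ (List.mem_cons_self ..)
        · exact List.mem_cons_self ..
      · exact List.mem_cons_of_mem _ (List.mem_cons_of_mem _ h)
    · intro y hy
      rcases List.mem_cons.mp hy with h | h
      · rw [h]; exact le_trans h0 hle_init
      · rcases List.mem_cons.mp h with h' | h'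
        · rw [h']; exact le_trans h0 hle_t
        · exact hmin _ (List.mem_cons_of_mem _ h')

theorem pvNotLtEmpty (s : String) : ¬ s < "" := by
  simp [String.lt_iff_toList_lt]

-- per inner list: the running-minimum scan from (0,"") picks the same word as sort-then-head
theorem pvInner (l : List (Int × String)) :
    (l.foldl (fun st t => if pvKey t < pvKey st then t else st) ((0 : Int), "")).2
      = (match PySem.List.sorted l (fun t => toLex (-t.1, t.2)) with
         | [] => ""
         | (f, w) :: _ => if f > 0 then w else "") := by
  obtain ⟨hmem, hmin⟩ := pvFoldMin l ((0 : Int), "")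
  set r := l.foldl (fun st t => if pvKey t < pvKey st then t else st) ((0 : Int), "") with hr
  cases hs : PySem.List.sorted l (fun t => toLex (-t.1, t.2)) with
  | nil =>
    have hl : l = [] := (PySem.List.sorted_eq_nil_iff ..).mp hs
    subst hl
    simp [hr]
  | cons m tm =>
    have hm : m ∈ l := (PySem.List.mem_sorted ..).mp (hs ▸ List.mem_cons_self ..)
    have hminS : ∀ y ∈ l, pvKey m ≤ pvKey y :=
      PySem.List.key_head_sorted_le l (fun t => toLex (-t.1, t.2)) hs
    obtain ⟨f, w⟩ := m
    by_cases hf : 0 < f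
    · have h1 : pvKey (f, w) < pvKey ((0 : Int), "") := by
        simp only [pvKey, Prod.Lex.toLex_lt_toLex]
        exact Or.inl (by omega)
      have hrl : r ∈ l := by
        rcases List.mem_cons.mp hmem with h | h
        · exfalso
          exact absurd h1 (not_lt_of_ge (h ▸ hmin (f, w) (List.mem_cons_of_mem _ hm)))
        · exact h
      have heq : r = (f, w) :=
        pvKey_inj (le_antisymm (hmin _ (List.mem_cons_of_mem _ hm)) (hminS r hrl))
      simp [heq, hf]
    · have hall : ∀ y ∈ l, ¬ pvKey y < pvKey ((0 : Int), "") := by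
        intro y hy hlt
        have h3 : 0 < y.1 := by
          rcases Prod.Lex.toLex_lt_toLex.mp hlt with h | ⟨h, hw⟩
          · simpa using h
          · exact absurd hw (pvNotLtEmpty _)
        have h2 := hminS y hy
        rcases Prod.Lex.toLex_le_toLex.mp h2 with h | ⟨h, _⟩ <;> omega
      have hr0 : r = ((0 : Int), "") := by
        have hle := hmin ((0 : Int), "") (List.mem_cons_self ..)
        rcases lt_or_eq_of_le hle with hlt | heq
        · exfalso
          rcases List.mem_cons.mp hmem with h | h
          · exact absurd (h ▸ hlt) (lt_irrefl _)
          · exact hall r h hlt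
        · exact pvKey_inj heq
      simp [hr0, hf]

-- ===== VERDICT (by name: the statement is the Claim_ definition above) =====
theorem identificar_sugestao_pares_spec : Claim_equal_identificar_sugestao_pares := by
  intro L _
  unfold Spec_identificar_sugestao_pares identificar_sugestao_pares identificar_sugestao_pares_alt
  rw [PySem.List.foldl_append_singleton_eq_map
      (f := fun lista_tupla =>
        ((PySem.List.pyRange 0 (PySem.List.len lista_tupla)).foldl
            (fun (st : Int × String) i =>
              if (PySem.List.pyGetD lista_tupla i ((0 : Int), "")).1 ≥ st.1 then
                if ((PySem.List.pyGetD lista_tupla i ((0 : Int), "")).1 = st.1 ∧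
                      (PySem.List.pyGetD lista_tupla i ((0 : Int), "")).2 < st.2) ∨
                    (PySem.List.pyGetD lista_tupla i ((0 : Int), "")).1 > st.1 then
                  ((PySem.List.pyGetD lista_tupla i ((0 : Int), "")).1,
                   (PySem.List.pyGetD lista_tupla i ((0 : Int), "")).2)
                else st
              else st)
            ((0 : Int), "")).2)]
  rw [List.nil_append]
  apply List.map_congr_left
  intro lista_tupla _
  rw [PySem.List.foldl_pyRange_pyGetD lista_tupla ((0 : Int), "")
      (f := fun (st : Int × String) t =>
        if t.1 ≥ st.1 then
          if (t.1 = st.1 ∧ t.2 < st.2) ∨ t.1 > st.1 then (t.1, t.2) else st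
        else st)
      ((0 : Int), "") (le_refl 0)]
  rw [Int.toNat_zero, List.drop_zero]
  rw [PySem.List.foldl_congr_mem lista_tupla
      (fun (st : Int × String) t =>
        if t.1 ≥ st.1 then
          if (t.1 = st.1 ∧ t.2 < st.2) ∨ t.1 > st.1 then (t.1, t.2) else st
        else st)
      (fun st t => if pvKey t < pvKey st then t else st)
      ((0 : Int), "") (fun acc x _ => pvStep_eq acc x)]
  exact pvInner lista_tupla
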